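-- pv_equiv track=rewrite | github.com/viettran295/cryptoTracking | Leet/findRestaurant.py | Solve
-- ===== SOURCE A (Python) =====
-- from typing import List
--
-- def Solve(list1: List[str], list2: List[str]) -> List[str]:
--     common = {}
--     min_sum = float('inf')
--     ans = []
--     for idx, i in enumerate(list1):
--         common[i] = idx
--     for idx, i in enumerate(list2):
--         if i in common:
--             if idx+common[i] < min_sum:
--                 ans = [i]
--                 min_sum = idx + common[i]
--             elif idx + common[i] == min_sum:
--                 ans.append(i)
--     return ans
-- ===== SOURCE B (Python) =====
-- from typing import List
--
-- def Solve(list1: List[str], list2: List[str]) -> List[str]: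
--     common = {name: idx for idx, name in enumerate(list1)}
--     pairs = [(idx + common[name], name) for idx, name in enumerate(list2) if name in common]
--     if not pairs:
--         return []
--     m = min(s for s, _ in pairs)
--     return [name for s, name in pairs if s == m]
-- ===== Notes on version B (the rewrite author's own statement) =====
-- stated objective: alternative
-- what changed: Replaces A's running-minimum conditional-append loop with a collect-then-reduce structure: one pass collects (sum, name) pairs for common names in list2 order, then min is taken over the sums and the pairs are filtered for that minimum.
import Mathlib
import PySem

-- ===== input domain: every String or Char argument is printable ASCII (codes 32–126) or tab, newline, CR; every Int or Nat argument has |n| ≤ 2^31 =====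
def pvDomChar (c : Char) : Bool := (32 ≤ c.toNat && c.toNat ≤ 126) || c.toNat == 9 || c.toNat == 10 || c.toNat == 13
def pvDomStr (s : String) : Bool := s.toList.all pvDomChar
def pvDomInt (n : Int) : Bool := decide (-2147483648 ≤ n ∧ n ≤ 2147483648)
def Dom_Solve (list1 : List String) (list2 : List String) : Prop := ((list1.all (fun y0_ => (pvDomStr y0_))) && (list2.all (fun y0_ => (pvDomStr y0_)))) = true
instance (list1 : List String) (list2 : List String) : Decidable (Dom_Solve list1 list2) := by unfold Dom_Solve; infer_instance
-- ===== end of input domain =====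

-- B is an alternative decomposition of A (collect pairs, take min, filter); equivalence of return values is proved below.

-- ===== PORT A =====
-- 'min_sum = float("inf")' is modelled as 'none'; 'idx+common[i] < inf' is always true,
-- which is the 'none' branch of the match.
def SolveStepA (common : PySem.Dict String Int) (st : List String × Option Int)
    (p : Int × String) : List String × Option Int :=
  if common.contains p.2 then
    let s := p.1 + common.getD p.2 0
    match st.2 with
    | none => ([p.2], some s)
    | some m =>
      if s < m then ([p.2], some s)
      else if s = m then (st.1 ++ [p.2], st.2)
      else st
  else st

def Solve (list1 : List String) (list2 : List String) : List String :=
  let common : PySem.Dict String Int :=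
    (PySem.List.enumerate list1).foldl (fun d p => d.insert p.2 p.1) PySem.Dict.empty
  ((PySem.List.enumerate list2).foldl (SolveStepA common) ([], none)).1

-- ===== PORT B =====
def Solve_alt (list1 : List String) (list2 : List String) : List String :=
  let common : PySem.Dict String Int :=
    (PySem.List.enumerate list1).foldl (fun d p => d.insert p.2 p.1) PySem.Dict.empty
  let pairs : List (Int × String) :=
    (PySem.List.enumerate list2).filterMap
      (fun p => if common.contains p.2 then some (p.1 + common.getD p.2 0, p.2) else none)
  match PySem.List.min? (pairs.map Prod.fst) (fun x => x) with
  | none => []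
  | some m => (pairs.filter (fun q => q.1 = m)).map Prod.snd

-- ===== PRECONDITION & SPEC =====
def Spec_Solve (list1 : List String) (list2 : List String) (out : List String) : Prop := out = Solve_alt list1 list2
instance (list1 : List String) (list2 : List String) (out : List String) : Decidable (Spec_Solve list1 list2 out) := by unfold Spec_Solve; infer_instance

-- ===== CLAIM (what is proved, stated in full; the proofs are below) =====
def Claim_equal_Solve : Prop := ∀ (list1 : List String) (list2 : List String), Dom_Solve list1 list2 → Spec_Solve list1 list2 (Solve list1 list2)

-- ===== LEMMAS AND PROOFS =====

-- reduce A's fold over the enumerated list to a fold over the filtered pairs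
lemma foldA_eq_fold_pairs (common : PySem.Dict String Int)
    (L : List (Int × String)) (st : List String × Option Int) :
    L.foldl (SolveStepA common) st =
      (L.filterMap (fun p => if common.contains p.2 then some (p.1 + common.getD p.2 0, p.2) else none)).foldl
        (fun st (q : Int × String) =>
          match st.2 with
          | none => ([q.2], some q.1)
          | some m =>
            if q.1 < m then ([q.2], some q.1)
            else if q.1 = m then (st.1 ++ [q.2], st.2)
            else st) st := by
  induction L generalizing st with
  | nil => rfl
  | cons p t ih =>
    by_cases h : common.contains p.2 = true
    · simp [List.foldl_cons, h, SolveStepA, ih]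
    · simp [List.foldl_cons, h, SolveStepA, ih]

lemma min?_id_append_singleton (xs : List Int) (a : Int) :
    PySem.List.min? (xs ++ [a]) (fun x => x) =
      some (match PySem.List.min? xs (fun x => x) with
            | none => a
            | some m => min m a) := by
  cases xs with
  | nil => simp [PySem.List.min?]
  | cons x t =>
    rw [List.cons_append, PySem.List.min?_id_cons, PySem.List.min?_id_cons]
    simp [List.foldl_append]

-- the collected running-minimum state equals the min/filter characterisation
lemma fold_pairs_eq_minfilter (pairs : List (Int × String)) :
    pairs.foldl
        (fun (st : List String × Option Int) (q : Int × String) =>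
          match st.2 with
          | none => ([q.2], some q.1)
          | some m =>
            if q.1 < m then ([q.2], some q.1)
            else if q.1 = m then (st.1 ++ [q.2], st.2)
            else st) ([], none) =
      (match PySem.List.min? (pairs.map Prod.fst) (fun x => x) with
       | none => []
       | some m => (pairs.filter (fun q => q.1 = m)).map Prod.snd,
       PySem.List.min? (pairs.map Prod.fst) (fun x => x)) := by
  induction pairs using List.reverseRecOn with
  | nil => rfl
  | append_singleton t a ih =>
    rw [List.foldl_append, ih]
    simp only [List.map_append, List.map_cons, List.map_nil, List.foldl_cons, List.foldl_nil]
    rw [min?_id_append_singleton]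
    cases hm : PySem.List.min? (t.map Prod.fst) (fun x => x) with
    | none =>
      have ht : t = [] := by
        have := (PySem.List.min?_eq_none_iff (xs := t.map Prod.fst) (key := fun x => x)).mp hm
        simpa using this
      subst ht; simp
    | some m =>
      have hmin : ∀ q ∈ t, m ≤ q.1 := by
        intro q hq
        have := PySem.List.min?_isMin (xs := t.map Prod.fst) (key := fun x => x) hm
        exact this q.1 (List.mem_map_of_mem hq)
      by_cases h1 : a.1 < m
      · have hfil : t.filter (fun q => decide (q.1 = a.1)) = [] := by
          apply List.filter_eq_nil_iff.mpr
          intro q hq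
          simp only [decide_eq_true_eq]
          exact fun he => absurd (hmin q hq) (by omega)
        simp [h1, min_eq_right (le_of_lt h1), List.filter_append, hfil]
      · by_cases h2 : a.1 = m
        · simp [h2, List.filter_append]
        · have hne : ¬ (m = a.1) := fun he => h2 he.symm
          simp [h1, h2, min_eq_left (by omega : m ≤ a.1), List.filter_append]

-- ===== VERDICT (by name: the statement is the Claim_ definition above) =====
theorem Solve_spec : Claim_equal_Solve := by
  intro list1 list2 _
  unfold Spec_Solve
  simp only [Solve, Solve_alt, foldA_eq_fold_pairs, fold_pairs_eq_minfilter]
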